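-- pv_equiv track=rewrite | github.com/fonttools/fonttools | Lib/fontTools/cffLib/opSpecializer.py | hvcurveto
-- ===== SOURCE A (Python) =====
-- def _everyN(el, n):
-- 	"""Group the list el into groups of size n"""
-- 	if len(el) % n != 0: raise ValueError(args)
-- 	for i in range(0, len(el), n):
-- 		yield el[i:i+n]
--
-- def hvcurveto(args):
-- 	if len(args) < 4 or len(args) % 8 not in (0,1,4,5): raise ValueError(args)
-- 	last_args = None
-- 	if len(args) % 2 == 1:
-- 		lastStraight = len(args) % 8 == 5
-- 		args, last_args = args[:-5], args[-5:]
-- 	it = _everyN(args, 4)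
-- 	try:
-- 		while True:
-- 			args = next(it)
-- 			yield ('rrcurveto', [args[0], 0, args[1], args[2], 0, args[3]])
-- 			args = next(it)
-- 			yield ('rrcurveto', [0, args[0], args[1], args[2], args[3], 0])
-- 	except StopIteration:
-- 		pass
-- 	if last_args:
-- 		args = last_args
-- 		if lastStraight:
-- 			yield ('rrcurveto', [args[0], 0, args[1], args[2], args[4], args[3]])
-- 		else:
-- 			yield ('rrcurveto', [0, args[0], args[1], args[2], args[3], args[4]])
-- ===== SOURCE B (Python) =====
-- def hvcurveto(args):
--     if len(args) < 4 or len(args) % 8 not in (0, 1, 4, 5):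
--         raise ValueError(args)
--     last_args = None
--     if len(args) % 2 == 1:
--         lastStraight = len(args) % 8 == 5
--         args, last_args = args[:-5], args[-5:]
--     out = []
--     horizontal = True
--     rest = args
--     while rest:
--         a, b, c, d, *rest = rest
--         if horizontal:
--             out.append(('rrcurveto', [a, 0, b, c, 0, d]))
--         else:
--             out.append(('rrcurveto', [0, a, b, c, d, 0]))
--         horizontal = not horizontal
--     if last_args:
--         la = last_args
--         if lastStraight:
--             out.append(('rrcurveto', [la[0], 0, la[1], la[2], la[4], la[3]]))
--         else:
--             out.append(('rrcurveto', [0, la[0], la[1], la[2], la[3], la[4]]))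
--     return out
-- ===== Notes on version B (the rewrite author's own statement) =====
-- stated objective: idiomatic
-- what changed: Replaces the _everyN generator and the exception-terminated while/next/next double-pull with one flat loop that destructures four arguments at a time and toggles a horizontal flag to pick the pattern; the trailing 5-argument group is handled as before.
import Mathlib
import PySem

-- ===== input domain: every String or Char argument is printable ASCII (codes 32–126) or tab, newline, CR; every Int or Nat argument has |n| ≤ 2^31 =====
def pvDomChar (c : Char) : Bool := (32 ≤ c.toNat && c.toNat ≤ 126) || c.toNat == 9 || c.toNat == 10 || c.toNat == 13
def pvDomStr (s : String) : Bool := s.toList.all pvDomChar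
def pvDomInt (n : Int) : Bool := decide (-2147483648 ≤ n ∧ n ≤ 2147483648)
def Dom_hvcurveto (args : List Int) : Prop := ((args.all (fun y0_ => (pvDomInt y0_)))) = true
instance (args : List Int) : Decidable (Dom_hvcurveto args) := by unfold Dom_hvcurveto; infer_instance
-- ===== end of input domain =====

-- B replaces A's exception-terminated generator double-pull (_everyN + while/next/next) by a
-- single flat loop with a toggled horizontal flag (objective: idiomatic).  A in Python is a
-- generator; equivalence is about the materialised sequence of yielded values.

-- ===== PORT A =====
-- A's inner loop: repeatedly pull a chunk of 4 and yield the horizontal pattern, then pull a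
-- second chunk of 4 and yield the vertical pattern; StopIteration (fewer than 4 left) ends it.
def hvLoopA : List Int → List (String × List Int)
  | a :: b :: c :: d :: e :: f :: g :: h :: rest =>
      ("rrcurveto", [a, 0, b, c, 0, d]) :: ("rrcurveto", [0, e, f, g, h, 0]) :: hvLoopA rest
  | a :: b :: c :: d :: _ =>
      [("rrcurveto", [a, 0, b, c, 0, d])]
  | _ => []

def hvcurveto (args : List Int) : List (String × List Int) :=
  -- the 'raise ValueError' branch is excluded by Pre_hvcurveto; the port returns [] there
  if args.length < 4 ∨ ¬(args.length % 8 = 0 ∨ args.length % 8 = 1 ∨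
      args.length % 8 = 4 ∨ args.length % 8 = 5) then []
  else
    let lastStraight := args.length % 8 = 5
    let main := if args.length % 2 = 1 then PySem.List.slice args none (some (-5)) else args
    let last_args := if args.length % 2 = 1 then PySem.List.slice args (some (-5)) none else []
    hvLoopA main ++
      (if last_args ≠ [] then
        match last_args with
        | [a, b, c, d, e] =>
            if lastStraight then [("rrcurveto", [a, 0, b, c, e, d])]
            else [("rrcurveto", [0, a, b, c, d, e])]
        | _ => []  -- unreachable under Pre_: the slice has exactly 5 elements
      else [])

-- ===== PORT B =====
-- B's loop: while elements remain, destructure four off the front and emit the pattern chosen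
-- by the toggled flag, appending to the accumulator 'out'.
def hvLoopB (out : List (String × List Int)) (horizontal : Bool) :
    List Int → List (String × List Int)
  | a :: b :: c :: d :: rest =>
      hvLoopB (out ++ [if horizontal then ("rrcurveto", [a, 0, b, c, 0, d])
                       else ("rrcurveto", [0, a, b, c, d, 0])]) (!horizontal) rest
  -- a nonempty rest of length < 4 raises in Python (excluded by Pre_); arms written out
  | [] => out
  | [_] => out
  | [_, _] => out
  | [_, _, _] => out

def hvcurveto_alt (args : List Int) : List (String × List Int) :=
  if args.length < 4 ∨ ¬(args.length % 8 = 0 ∨ args.length % 8 = 1 ∨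
      args.length % 8 = 4 ∨ args.length % 8 = 5) then []
  else
    let lastStraight := args.length % 8 = 5
    let main := if args.length % 2 = 1 then PySem.List.slice args none (some (-5)) else args
    let last_args := if args.length % 2 = 1 then PySem.List.slice args (some (-5)) none else []
    hvLoopB [] true main ++
      (if last_args ≠ [] then
        -- la[k]: the slice has exactly 5 elements whenever nonempty, so indices 0–4 are in
        -- range and pyGetD is exact there
        let la := last_args
        if lastStraight then
          [("rrcurveto", [PySem.List.pyGetD la 0 0, 0, PySem.List.pyGetD la 1 0,
            PySem.List.pyGetD la 2 0, PySem.List.pyGetD la 4 0, PySem.List.pyGetD la 3 0])]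
        else
          [("rrcurveto", [0, PySem.List.pyGetD la 0 0, PySem.List.pyGetD la 1 0,
            PySem.List.pyGetD la 2 0, PySem.List.pyGetD la 3 0, PySem.List.pyGetD la 4 0])]
      else [])

-- ===== PRECONDITION & SPEC =====
-- Pre_ excludes exactly the inputs on which Python A raises ValueError (too short, or a
-- length with a remainder mod 8 other than 0, 1, 4, 5).
def Pre_hvcurveto (args : List Int) : Prop :=
  4 ≤ args.length ∧ (args.length % 8 = 0 ∨ args.length % 8 = 1 ∨
    args.length % 8 = 4 ∨ args.length % 8 = 5)
instance (args : List Int) : Decidable (Pre_hvcurveto args) := by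
  unfold Pre_hvcurveto; infer_instance
def pvWitness_hvcurveto : List Int := ([1, 2, 3, 4])

def Spec_hvcurveto (args : List Int) (out : List (String × List Int)) : Prop := out = hvcurveto_alt args
instance (args : List Int) (out : List (String × List Int)) : Decidable (Spec_hvcurveto args out) := by unfold Spec_hvcurveto; infer_instance

-- ===== CLAIM (what is proved, stated in full; the proofs are below) =====
def Claim_equal_hvcurveto : Prop := ∀ (args : List Int), Dom_hvcurveto args → Pre_hvcurveto args → Spec_hvcurveto args (hvcurveto args)

-- ===== LEMMAS AND PROOFS =====
theorem hvLoopB_eq_hvLoopA (l : List Int) :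
    ∀ out, hvLoopB out true l = out ++ hvLoopA l := by
  induction l using hvLoopA.induct with
  | case1 a b c d e f g h rest ih =>
      intro out
      simp only [hvLoopB, hvLoopA, Bool.not_true, Bool.not_false, if_true, ih]
      simp
  | case2 a b c d rest h1 =>
      intro out
      -- rest has fewer than 4 elements
      simp only [hvLoopB, hvLoopA]
      match rest, h1 with
      | [], _ => simp [hvLoopB]
      | [x], _ => simp [hvLoopB]
      | [x, y], _ => simp [hvLoopB]
      | [x, y, z], _ => simp [hvLoopB]
      | x :: y :: z :: w :: r, h1 => exact absurd rfl (h1 x y z w r)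
  | case3 l h1 h2 =>
      intro out
      match l, h2 with
      | [], _ => simp [hvLoopB, hvLoopA]
      | [x], _ => simp [hvLoopB, hvLoopA]
      | [x, y], _ => simp [hvLoopB, hvLoopA]
      | [x, y, z], _ => simp [hvLoopB, hvLoopA]
      | x :: y :: z :: w :: r, h2 => exact absurd rfl (h2 x y z w r)

-- ===== VERDICT (by name: the statement is the Claim_ definition above) =====
theorem hvcurveto_spec : Claim_equal_hvcurveto := by
  intro args _ hpre
  obtain ⟨h4, h8⟩ := hpre
  unfold Spec_hvcurveto hvcurveto hvcurveto_alt
  split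
  · rfl
  · simp only [hvLoopB_eq_hvLoopA, List.nil_append]
    congr 1
    by_cases hodd : args.length % 2 = 1
    · simp only [hodd, if_pos]
      rw [PySem.List.slice_from_neg_ofNat args 5 (by omega)]
      have h5 : 5 ≤ args.length := by omega
      have hlen : (args.drop (args.length - 5)).length = 5 := by
        rw [List.length_drop]; omega
      generalize args.drop (args.length - 5) = L at hlen ⊢
      rcases L with _ | ⟨a, L⟩; · simp at hlen
      rcases L with _ | ⟨b, L⟩; · simp at hlen
      rcases L with _ | ⟨c, L⟩; · simp at hlen
      rcases L with _ | ⟨d, L⟩; · simp at hlen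
      rcases L with _ | ⟨e, L⟩; · simp at hlen
      rcases L with _ | ⟨f, L⟩
      · simp only [ne_eq, reduceCtorEq, not_false_eq_true, if_pos]
        split <;> simp [PySem.List.pyGetD, PySem.List.pyGet?, PySem.List.pyIdx?]
      · simp at hlen
    · simp [hodd]
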